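-- pv_equiv track=rewrite | github.com/charlieqf/deal_viewer | dv_export/exporttrustinfo.py | incisecore
-- ===== SOURCE A (Python) =====
-- import math
--
-- def split(list,parts):
--     '''''将条件 A in (1,2,3,...) And B in (1,2,3,...) 拆分为： A in（1,2） And B in (1,2);A in（1,2） And B in (3);A in（1,2） And B in (3);A in（3） And B in (1,2);
--         A in（3） And B in (3)'''
--     i = 0
--     getcount = math.ceil(len(list)/parts)
--     loc = 0
--     tmpset = {}
--     while i < parts:
--         if len(list)<parts:
--             tmpset.update({0:list})
--         else:
--             if loc <= len(list):
--                 if len(list[loc:loc+getcount]) != 0: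
--                     tmpset.update({i:list[loc:loc+getcount]})
--                     loc = loc + getcount
--         i = i + 1
--     return tmpset
--
-- def incisecore(dictionary,factor):
--     resultList = []
--     conditionStr = ""
--     condiListList = []
--     conditionDictionary = {}
--     currentIndexList = []
--     conditionSplitCount = []
--     for fKey in dictionary.keys():
--         conditionDictionary.update({fKey:split(dictionary[fKey],factor)})
--         currentIndexList.append(len(conditionDictionary[fKey])-1)
--         conditionSplitCount.append(len(conditionDictionary[fKey])-1)
--
--     while True:
--         i = 0
--         conditionStrList = []
--         for fKey in conditionDictionary.keys():
--             setEnumerable = conditionDictionary[fKey][currentIndexList[i]]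
--             conditionStr = fKey + " in (''" + "'',''".join(str(j) for j in setEnumerable) + "'')"
--             conditionStrList.append(conditionStr)
--             i = i + 1
--         condiListList.append(conditionStrList)
--         if AllIsZero(currentIndexList):
--             break
--         flag = True
--         for j in range(len(currentIndexList)):
--
--             if currentIndexList[j] > 0 and flag:
--                 currentIndexList[j] = currentIndexList[j] - 1
--                 flag = False
--             elif currentIndexList[j] == 0 and flag:
--                 currentIndexList[j] = conditionSplitCount[j]
--     for conditionLst in condiListList:
--         conditionStr = " and ".join(conditionLst)
--         resultList.append(conditionStr)
--     return resultList
--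
-- def AllIsZero(lst):
--     for v in lst:
--
--         if v != 0:
--             return False
--     return True
-- ===== SOURCE B (Python) =====
-- def incisecore(dictionary, factor):
--     table = []
--     for key, vals in dictionary.items():
--         if len(vals) < factor:
--             parts = [vals]
--         else:
--             size = -(-len(vals) // factor)
--             parts = []
--             rest = vals
--             while rest:
--                 parts.append(rest[:size])
--                 rest = rest[size:]
--         table.append([key + " in (''" + "'',''".join(str(v) for v in part) + "'')"
--                       for part in parts])
--     combos = [[]]
--     for t in reversed(table):
--         combos = [[s] + c for c in combos for s in reversed(t)]
--     return [" and ".join(c) for c in combos]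
-- ===== Notes on version B (the rewrite author's own statement) =====
-- stated objective: simpler
-- what changed: Replaces A's per-key split dict plus the in-place odometer (index list counted down with a flag scan and an all-zero test each round) by per-key condition-string tables computed once and a single reversed-fold cartesian product of reversed rows, joined at the end.
import Mathlib
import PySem

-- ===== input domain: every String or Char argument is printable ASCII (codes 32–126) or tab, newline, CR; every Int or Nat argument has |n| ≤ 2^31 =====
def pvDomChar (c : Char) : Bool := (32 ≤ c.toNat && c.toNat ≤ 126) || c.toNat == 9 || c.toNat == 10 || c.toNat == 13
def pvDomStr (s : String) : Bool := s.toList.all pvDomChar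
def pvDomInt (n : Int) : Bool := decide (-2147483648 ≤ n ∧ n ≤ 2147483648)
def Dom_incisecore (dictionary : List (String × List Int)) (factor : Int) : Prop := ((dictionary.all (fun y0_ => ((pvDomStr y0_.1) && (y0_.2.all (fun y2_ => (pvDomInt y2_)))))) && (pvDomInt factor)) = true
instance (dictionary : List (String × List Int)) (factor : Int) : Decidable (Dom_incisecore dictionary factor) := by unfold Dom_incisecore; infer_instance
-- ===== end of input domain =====

-- B replaces A's per-key split dict and in-place odometer by precomputed condition tables and a
-- reversed-fold cartesian product (objective: simpler); equal on Pre_ (A raises for factor ≤ 0 with a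
-- non-empty dict).

-- Helper shared by both ports: the condition fragment both Pythons assemble with the same string ops
-- (fKey + " in (''" + "'',''".join(str(j) for j in chunk) + "'')").
def condStr (k : String) (chunk : List Int) : String :=
  PySem.Str.join "" [k, " in (''", PySem.Str.join "'',''" (chunk.map PySem.Int.toStr), "'')"]

-- ===== PORT A =====
-- 'while i < parts' of split: fuel = number of iterations, i the Python counter.
def splitLoop (lst : List Int) (parts getcount : Int) :
    Nat → Int → Int → PySem.Dict Int (List Int) → PySem.Dict Int (List Int)
  | 0, _, _, tmpset => tmpset
  | fuel+1, i, loc, tmpset =>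
    if (lst.length : Int) < parts then
      splitLoop lst parts getcount fuel (i+1) loc (tmpset.insert 0 lst)
    else if loc ≤ (lst.length : Int) then
      let chunk := PySem.List.slice lst (some loc) (some (loc + getcount))
      if chunk.length ≠ 0 then
        splitLoop lst parts getcount fuel (i+1) (loc + getcount) (tmpset.insert i chunk)
      else splitLoop lst parts getcount fuel (i+1) loc tmpset
    else splitLoop lst parts getcount fuel (i+1) loc tmpset

def splitPy (lst : List Int) (parts : Int) : PySem.Dict Int (List Int) :=
  -- math.ceil(len(list)/parts), exact in integers: ⌈a/b⌉ = -((-a) // b)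
  let getcount : Int := -(PySem.Int.floordiv (-(lst.length : Int)) parts)
  splitLoop lst parts getcount parts.toNat 0 0 PySem.Dict.empty

def allIsZero : List Int → Bool
  | [] => true
  | v :: rest => if v ≠ 0 then false else allIsZero rest

-- inner 'for fKey in conditionDictionary.keys()' with the running counter i; the conditionDictionary
-- has the distinct fKeys as keys, kept here as a list of pairs in insertion order.
def mkRow (cond : List (String × PySem.Dict Int (List Int))) (idxs : List Int) : List String :=
  (cond.foldl (fun (st : Int × List String) kv =>
      let setEnumerable := kv.2.getD (PySem.List.pyGetD idxs st.1 0) []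
      (st.1 + 1, st.2 ++ [condStr kv.1 setEnumerable])) ((0 : Int), ([] : List String))).2

-- 'for j in range(len(currentIndexList))' mutating the list with the flag
def stepIdx (counts : List Int) (idxs : List Int) : List Int :=
  ((List.range idxs.length).foldl (fun (st : List Int × Bool) (j : Nat) =>
      let v := PySem.List.pyGetD st.1 (j : Int) 0
      if v > 0 ∧ st.2 then (PySem.List.pySetD st.1 (j : Int) (v - 1), false)
      else if v = 0 ∧ st.2 then (PySem.List.pySetD st.1 (j : Int) (PySem.List.pyGetD counts (j : Int) 0), st.2)
      else st) (idxs, true)).1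

-- the 'while True' loop; fuel only makes it total (A terminates on every input Pre_ admits)
def mainLoop (cond : List (String × PySem.Dict Int (List Int))) (counts : List Int) :
    Nat → List Int → List (List String) → List (List String)
  | 0, _, acc => acc
  | fuel+1, idxs, acc =>
    let acc' := acc ++ [mkRow cond idxs]
    if allIsZero idxs then acc'
    else mainLoop cond counts fuel (stepIdx counts idxs) acc'

def incisecore (dictionary : List (String × List Int)) (factor : Int) : List String :=
  -- the Python parameter is a dict: normalise the association list to its items (same in both ports)
  let items := (PySem.Dict.ofList dictionary).items
  let built := items.foldl (fun (st : List (String × PySem.Dict Int (List Int)) × List Int × List Int) kv =>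
      let d := splitPy kv.2 factor
      (st.1 ++ [(kv.1, d)], st.2.1 ++ [(d.size : Int) - 1], st.2.2 ++ [(d.size : Int) - 1]))
      (([] : List (String × PySem.Dict Int (List Int))), ([] : List Int), ([] : List Int))
  let fuel := (built.2.2.foldl (fun a c => a * (c + 1)) 1).toNat + 1
  (mainLoop built.1 built.2.2 fuel built.2.1 []).map (fun row => PySem.Str.join " and " row)

-- ===== PORT B =====
-- 'while rest: parts.append(rest[:size]); rest = rest[size:]' (fuel only makes it total)
def chunkLoop (size : Int) : Nat → List Int → List (List Int)
  | 0, _ => []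
  | fuel+1, rest =>
    if rest.isEmpty then []
    else PySem.List.slice rest none (some size) :: chunkLoop size fuel (PySem.List.slice rest (some size) none)

def chunksOf (vals : List Int) (factor : Int) : List (List Int) :=
  if (vals.length : Int) < factor then [vals]
  else
    let size : Int := -(PySem.Int.floordiv (-(vals.length : Int)) factor)
    chunkLoop size vals.length vals

def incisecore_alt (dictionary : List (String × List Int)) (factor : Int) : List String :=
  let items := (PySem.Dict.ofList dictionary).items
  let table := items.map (fun kv => (chunksOf kv.2 factor).map (fun c => condStr kv.1 c))
  let combos := table.reverse.foldl
      (fun combos t => combos.flatMap (fun c => t.reverse.map (fun s => s :: c))) [[]]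
  combos.map (fun c => PySem.Str.join " and " c)

-- ===== PRECONDITION & SPEC =====
-- Pre_ excludes exactly the inputs where A raises: a non-empty dictionary with factor ≤ 0
-- (ZeroDivisionError in split for factor = 0, KeyError on the empty split dict for factor < 0).
def Pre_incisecore (dictionary : List (String × List Int)) (factor : Int) : Prop :=
  dictionary = [] ∨ 1 ≤ factor
instance (dictionary : List (String × List Int)) (factor : Int) : Decidable (Pre_incisecore dictionary factor) := by unfold Pre_incisecore; infer_instance
def pvWitness_incisecore : (List (String × List Int)) × Int := ([("a", [1, 2, 3]), ("b", [4])], 2)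
def Spec_incisecore (dictionary : List (String × List Int)) (factor : Int) (out : List String) : Prop := out = incisecore_alt dictionary factor
instance (dictionary : List (String × List Int)) (factor : Int) (out : List String) : Decidable (Spec_incisecore dictionary factor out) := by unfold Spec_incisecore; infer_instance

-- ===== CLAIM (what is proved, stated in full; the proofs are below) =====
def Claim_equal_incisecore : Prop := ∀ (dictionary : List (String × List Int)) (factor : Int), Dom_incisecore dictionary factor → Pre_incisecore dictionary factor → Spec_incisecore dictionary factor (incisecore dictionary factor)

-- ===== LEMMAS AND PROOFS =====
-- ---------- chunking: B's loop as a fuel-free function ----------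
def chunksWF (g : Int) (rest : List Int) : List (List Int) :=
  if rest = [] ∨ g ≤ 0 then []
  else rest.take g.toNat :: chunksWF g (rest.drop g.toNat)
termination_by rest.length
decreasing_by
  rename_i h
  push_neg at h
  have h1 : 1 ≤ g.toNat := by omega
  have h2 : 0 < rest.length := List.length_pos_of_ne_nil h.1
  simp [List.length_drop]; omega

theorem chunksWF_nil (g : Int) : chunksWF g [] = [] := by
  rw [chunksWF]; simp

theorem chunksWF_cons (g : Int) (rest : List Int) (hg : 0 < g) (hr : rest ≠ []) :
    chunksWF g rest = rest.take g.toNat :: chunksWF g (rest.drop g.toNat) := by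
  rw [chunksWF, if_neg]; push_neg; exact ⟨hr, by omega⟩

theorem chunkLoop_eq_chunksWF (g : Int) (hg : 0 < g) :
    ∀ (f : Nat) (rest : List Int), rest.length ≤ f → chunkLoop g f rest = chunksWF g rest := by
  intro f
  induction f with
  | zero =>
    intro rest h
    have : rest = [] := by cases rest with | nil => rfl | cons a t => simp at h
    subst this; simp [chunkLoop, chunksWF_nil]
  | succ f ih =>
    intro rest h
    cases rest with
    | nil => simp [chunkLoop, chunksWF_nil]
    | cons a t =>
      rw [chunkLoop, chunksWF_cons g _ hg (by simp)]
      rw [PySem.List.slice_to _ (by omega), PySem.List.slice_from _ (by omega)]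
      simp only [List.isEmpty_cons, Bool.false_eq_true, if_false, List.cons.injEq, true_and]
      apply ih
      have h1 : 1 ≤ g.toNat := by omega
      simp only [List.length_drop, List.length_cons] at *
      omega

theorem chunksWF_length_le (g : Int) (hg : 0 < g) :
    ∀ (rest : List Int) (k : Nat), rest.length ≤ k * g.toNat → (chunksWF g rest).length ≤ k := by
  intro rest
  induction rest using chunksWF.induct g with
  | case1 r h =>
    intro k _
    rw [chunksWF, if_pos h]; simp
  | case2 r h ih =>
    push_neg at h
    intro k hk
    rw [chunksWF_cons g _ hg h.1]
    have h2 : 0 < r.length := List.length_pos_of_ne_nil h.1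
    have h1 : 1 ≤ g.toNat := by omega
    have hk1 : 1 ≤ k := by nlinarith
    obtain ⟨k', rfl⟩ : ∃ k', k = k' + 1 := ⟨k - 1, by omega⟩
    rw [Nat.succ_mul] at hk
    have := ih k' (by simp only [List.length_drop]; omega)
    simp only [List.length_cons]
    omega

theorem chunksWF_ne_nil (g : Int) (rest : List Int) (hg : 0 < g) (hr : rest ≠ []) :
    chunksWF g rest ≠ [] := by
  rw [chunksWF_cons g _ hg hr]; simp

-- ---------- split: A's while-loop dict equals B's chunk list ----------
theorem ceil_pos (n parts : Int) (hp : 0 < parts) (hn : 0 < n) :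
    1 ≤ -(PySem.Int.floordiv (-n) parts) := by
  have h := (PySem.Int.floordiv_lt_iff_lt_mul (a := -n) (q := 0) hp).2 (by omega)
  omega

theorem ceil_bound (n parts : Int) (hp : 0 < parts) :
    n ≤ parts * -(PySem.Int.floordiv (-n) parts) := by
  have h := (PySem.Int.le_floordiv_iff_mul_le
      (a := -n) (q := PySem.Int.floordiv (-n) parts) hp).1 (le_refl _)
  nlinarith

theorem splitLoop_skip (lst : List Int) (parts g : Int)
    (hnp : ¬((lst.length : Int) < parts)) (hg : 0 < g) :
    ∀ (f : Nat) (i loc : Int) (d : PySem.Dict Int (List Int)),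
      (lst.length : Int) ≤ loc → splitLoop lst parts g f i loc d = d := by
  intro f
  induction f with
  | zero => intro i loc d _; rfl
  | succ f ih =>
    intro i loc d hloc
    rw [splitLoop, if_neg hnp]
    by_cases hle : loc ≤ (lst.length : Int)
    · have hloc' : loc = (lst.length : Int) := le_antisymm hle hloc
      rw [if_pos hle]
      have hchunk : PySem.List.slice lst (some loc) (some (loc + g)) = [] := by
        rw [PySem.List.slice_toNat]
        · rw [List.drop_eq_nil_iff.2 (by omega)]; simp
        · omega
        · omega
      simp only [hchunk, List.length_nil, ne_eq, not_true_eq_false, if_false]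
      exact ih _ _ _ hloc
    · rw [if_neg hle]; exact ih _ _ _ hloc

theorem splitLoop_small (lst : List Int) (parts g : Int)
    (hlt : (lst.length : Int) < parts) :
    ∀ (f : Nat), 1 ≤ f → ∀ (i loc : Int) (d : PySem.Dict Int (List Int)),
      splitLoop lst parts g f i loc d = d.insert 0 lst := by
  intro f
  induction f with
  | zero => omega
  | succ f ih =>
    intro _ i loc d
    rw [splitLoop, if_pos hlt]
    rcases Nat.eq_zero_or_pos f with hf | hf
    · subst hf; rfl
    · rw [ih hf]; exact PySem.Dict.insert_insert_self _ _ _ _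

theorem splitLoop_main (lst : List Int) (parts g : Int)
    (hnp : ¬((lst.length : Int) < parts)) (hg : 0 < g) :
    ∀ (f : Nat) (loc : Nat) (i : Int) (d : PySem.Dict Int (List Int)),
      (chunksWF g (lst.drop loc)).length ≤ f →
      splitLoop lst parts g f i (loc : Int) d
        = (PySem.List.enumerate (chunksWF g (lst.drop loc)) i).foldl
            (fun d p => d.insert p.1 p.2) d := by
  intro f
  induction f with
  | zero =>
    intro loc i d hlen
    have : chunksWF g (lst.drop loc) = [] := List.eq_nil_of_length_eq_zero (by omega)
    rw [this, PySem.List.enumerate_nil]; rfl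
  | succ f ih =>
    intro loc i d hlen
    by_cases hdrop : lst.drop loc = []
    · rw [hdrop, chunksWF_nil, PySem.List.enumerate_nil]
      exact splitLoop_skip lst parts g hnp hg _ _ _ _
        (by exact_mod_cast Int.ofNat_le.2 (List.drop_eq_nil_iff.1 hdrop))
    · have hlt : loc < lst.length := by
        by_contra hcon
        exact hdrop (List.drop_eq_nil_iff.2 (by omega))
      rw [chunksWF_cons g _ hg hdrop] at hlen ⊢
      rw [splitLoop, if_neg hnp, if_pos (by exact_mod_cast Int.ofNat_le.2 (by omega))]
      have hchunk : PySem.List.slice lst (some (loc : Int)) (some ((loc : Int) + g))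
          = (lst.drop loc).take g.toNat := by
        rw [PySem.List.slice_toNat]
        · simp only [Int.toNat_natCast]
          congr 1
          omega
        · omega
        · omega
      have hne : ((lst.drop loc).take g.toNat).length ≠ 0 := by
        have : 0 < (lst.drop loc).length := List.length_pos_of_ne_nil hdrop
        simp only [List.length_take]
        omega
      simp only [hchunk, hne, if_true, ne_eq, not_false_eq_true, if_pos]
      have hdd : List.drop g.toNat (List.drop loc lst) = List.drop (loc + g.toNat) lst := by
        rw [List.drop_drop]
      rw [hdd] at hlen
      have hcast : (loc : Int) + g = ((loc + g.toNat : Nat) : Int) := by omega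
      rw [hcast, ih (loc + g.toNat) (i + 1) (d.insert i ((lst.drop loc).take g.toNat))
        (by simp only [List.length_cons] at hlen; omega)]
      rw [PySem.List.enumerate_cons, hdd]
      simp only [List.foldl_cons]

theorem splitPy_items (lst : List Int) (parts : Int) (hp : 0 < parts) :
    (splitPy lst parts).items = PySem.List.enumerate (chunksOf lst parts) 0 := by
  unfold splitPy chunksOf
  by_cases hlt : (lst.length : Int) < parts
  · rw [if_pos hlt, splitLoop_small lst parts _ hlt parts.toNat (by omega) 0 0 _]
    rw [PySem.Dict.items_insert_of_not_contains _ _ (by simp)]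
    simp [PySem.List.enumerate_cons, PySem.List.enumerate_nil, PySem.Dict.empty]
  · rw [if_neg hlt]
    have hg : 0 < -(PySem.Int.floordiv (-(lst.length : Int)) parts) :=
      ceil_pos _ _ hp (by omega)
    set g := -(PySem.Int.floordiv (-(lst.length : Int)) parts) with hgdef
    have hb := ceil_bound (lst.length : Int) parts hp
    rw [← hgdef] at hb
    have hchunklen : (chunksWF g lst).length ≤ parts.toNat := by
      apply chunksWF_length_le g hg
      have h1 : (parts.toNat : Int) = parts := Int.toNat_of_nonneg (by omega)
      have h2 : (g.toNat : Int) = g := Int.toNat_of_nonneg (by omega)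
      have : (lst.length : Int) ≤ ((parts.toNat * g.toNat : Nat) : Int) := by
        push_cast
        rw [h1, h2]
        exact hb
      exact_mod_cast this
    have hmain := splitLoop_main lst parts g hlt hg parts.toNat 0 0 PySem.Dict.empty
      (by simpa using hchunklen)
    simp only [Nat.cast_zero, List.drop_zero] at hmain
    rw [hmain, chunkLoop_eq_chunksWF g hg lst.length lst (le_refl _)]
    rw [PySem.Dict.items_foldl_insert_fresh _ Prod.fst Prod.snd _ (by intro a _; simp)
      (by rw [PySem.List.map_fst_enumerate]; exact PySem.List.nodup_pyRange_one _ _)]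
    simp [PySem.Dict.empty]

theorem splitPy_keys_nodup (lst : List Int) (parts : Int) (hp : 0 < parts) :
    (splitPy lst parts).keys.Nodup := by
  simp only [PySem.Dict.keys, splitPy_items lst parts hp]
  rw [PySem.List.map_fst_enumerate]
  exact PySem.List.nodup_pyRange_one _ _

theorem splitPy_size (lst : List Int) (parts : Int) (hp : 0 < parts) :
    (splitPy lst parts).size = (chunksOf lst parts).length := by
  simp only [PySem.Dict.size, splitPy_items lst parts hp, PySem.List.length_enumerate]

theorem splitPy_getD (lst : List Int) (parts : Int) (hp : 0 < parts) (j : Int)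
    (h0 : 0 ≤ j) (hj : j < ((chunksOf lst parts).length : Int)) :
    (splitPy lst parts).getD j [] = (chunksOf lst parts).getD j.toNat [] := by
  have hjn : j.toNat < (chunksOf lst parts).length := by omega
  rw [List.getD_eq_getElem _ _ hjn]
  apply PySem.Dict.getD_of_mem_items _ _ (splitPy_keys_nodup lst parts hp)
  rw [splitPy_items lst parts hp, PySem.List.mem_enumerate_iff]
  exact ⟨j.toNat, hjn, by simp; omega⟩

-- ---------- the odometer, abstracted ----------
def selRow (tb : List (List String)) (idxs : List Int) : List String :=
  (tb.zip idxs).map (fun p => PySem.List.pyGetD p.1 p.2 "")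

def stepSpec : List Int → List Int → List Int
  | c0 :: cs, i :: is => if 0 < i then (i - 1) :: is else c0 :: stepSpec cs is
  | _, is => is

def Vval : List Int → List Int → Int
  | i :: is, c0 :: cs => i + (c0 + 1) * Vval is cs
  | _, _ => 0

def Espec (tb : List (List String)) (counts : List Int) : Nat → List Int → List (List String)
  | 0, _ => []
  | f+1, idxs => selRow tb idxs ::
      (if allIsZero idxs then [] else Espec tb counts f (stepSpec counts idxs))

def descSel (t : List String) : Nat → List String
  | 0 => [PySem.List.pyGetD t 0 ""]
  | k+1 => PySem.List.pyGetD t ((k : Int) + 1) "" :: descSel t k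

def combSpec (tb : List (List String)) : List (List String) :=
  tb.foldr (fun t acc => acc.flatMap (fun c => t.reverse.map (fun s => s :: c))) [[]]

def CondLink (cond : List (String × PySem.Dict Int (List Int))) (tb : List (List String)) : Prop :=
  List.Forall₂ (fun kv t => ∀ i : Int, 0 ≤ i → i < (t.length : Int) →
    condStr kv.1 (kv.2.getD i []) = PySem.List.pyGetD t i "") cond tb

theorem allIsZero_cons (i : Int) (is : List Int) :
    allIsZero (i :: is) = (decide (i = 0) && allIsZero is) := by
  by_cases h : i = 0 <;> simp [allIsZero, h]

theorem Vval_nonneg : ∀ {counts idxs : List Int},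
    List.Forall₂ (fun c i => 0 ≤ i ∧ i ≤ c) counts idxs → 0 ≤ Vval idxs counts := by
  intro counts idxs h
  induction h with
  | nil => simp [Vval]
  | @cons c0 i cs is hp _ ih =>
    simp only [Vval]
    have : 0 ≤ (c0 + 1) * Vval is cs := mul_nonneg (by omega) ih
    omega

theorem Vval_zero_iff : ∀ {counts idxs : List Int},
    List.Forall₂ (fun c i => 0 ≤ i ∧ i ≤ c) counts idxs →
    (allIsZero idxs = true ↔ Vval idxs counts = 0) := by
  intro counts idxs h
  induction h with
  | nil => simp [allIsZero, Vval]
  | @cons c0 i cs is hp htail ih =>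
    rw [allIsZero_cons]
    simp only [Vval, Bool.and_eq_true, decide_eq_true_eq]
    have h1 : 0 ≤ Vval is cs := Vval_nonneg htail
    have h2 : 0 ≤ c0 := by omega
    constructor
    · rintro ⟨rfl, hz⟩
      rw [ih.1 hz]
      ring
    · intro hz
      have : 0 ≤ (c0 + 1) * Vval is cs := mul_nonneg (by omega) h1
      have hi : i = 0 := by omega
      have : (c0 + 1) * Vval is cs = 0 := by omega
      have : Vval is cs = 0 := by
        rcases mul_eq_zero.1 this with h | h
        · omega
        · exact h
      exact ⟨hi, ih.2 this⟩

theorem stepSpec_valid : ∀ {counts idxs : List Int},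
    List.Forall₂ (fun c i => 0 ≤ i ∧ i ≤ c) counts idxs →
    List.Forall₂ (fun c i => 0 ≤ i ∧ i ≤ c) counts (stepSpec counts idxs) := by
  intro counts idxs h
  induction h with
  | nil => exact List.Forall₂.nil
  | @cons c0 i cs is hp _ ih =>
    by_cases hi : 0 < i
    · rw [stepSpec, if_pos hi]
      exact List.Forall₂.cons (by omega) (by assumption)
    · rw [stepSpec, if_neg hi]
      exact List.Forall₂.cons (by omega) ih

theorem stepSpec_V : ∀ {counts idxs : List Int},
    List.Forall₂ (fun c i => 0 ≤ i ∧ i ≤ c) counts idxs → allIsZero idxs = false →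
    Vval (stepSpec counts idxs) counts = Vval idxs counts - 1 := by
  intro counts idxs h
  induction h with
  | nil => intro hz; simp [allIsZero] at hz
  | @cons c0 i cs is hp htail ih =>
    intro hz
    by_cases hi : 0 < i
    · rw [stepSpec, if_pos hi]
      simp only [Vval]
      ring
    · have hi0 : i = 0 := by omega
      subst hi0
      rw [allIsZero_cons] at hz
      simp only [decide_true, Bool.true_and] at hz
      rw [stepSpec, if_neg (by omega)]
      simp only [Vval, ih hz]
      ring


-- ---------- mkRow computes selRow ----------
theorem mkRow_aux (idxs : List Int) :
    ∀ {cond : List (String × PySem.Dict Int (List Int))} {tb : List (List String)},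
      CondLink cond tb →
      ∀ (k : Nat) (acc : List String),
      List.Forall₂ (fun t i => 0 ≤ i ∧ i < (t.length : Int)) tb (idxs.drop k) →
      (cond.foldl (fun (st : Int × List String) kv =>
          let setEnumerable := kv.2.getD (PySem.List.pyGetD idxs st.1 0) []
          (st.1 + 1, st.2 ++ [condStr kv.1 setEnumerable])) ((k : Int), acc)).2
        = acc ++ selRow tb (idxs.drop k) := by
  intro cond tb hlink
  induction hlink with
  | nil =>
    intro k acc hval
    rw [List.forall₂_nil_left_iff] at hval
    simp [selRow, hval]
  | @cons kv t cond' tb' hR hlink' ih =>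
    intro k acc hval
    obtain ⟨i, rest, hb, hrest, hir⟩ := List.forall₂_cons_left_iff.1 hval
    have hget0 : (idxs.drop k)[0]? = some i := by rw [hir]; rfl
    rw [List.getElem?_drop] at hget0
    norm_num at hget0
    have hdropk1 : idxs.drop (k+1) = rest := by
      have h2 := List.drop_drop (i := 1) (j := k) (l := idxs)
      rw [hir] at h2
      simpa using h2.symm
    simp only [List.foldl_cons]
    have hvi : PySem.List.pyGetD idxs ((k : Int)) 0 = i := by
      simp only [PySem.List.pyGetD_natCast]
      rw [List.getD_eq_getElem?_getD, hget0]
      rfl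
    simp only [hvi]
    rw [hR i hb.1 hb.2]
    have hcast : (k : Int) + 1 = ((k + 1 : Nat) : Int) := by push_cast; ring
    rw [hcast, ih (k+1) (acc ++ [PySem.List.pyGetD t i ""]) (by rw [hdropk1]; exact hrest)]
    rw [hir, hdropk1]
    simp [selRow]

theorem mkRow_eq_selRow (cond : List (String × PySem.Dict Int (List Int)))
    (tb : List (List String)) (idxs : List Int) (hlink : CondLink cond tb)
    (hval : List.Forall₂ (fun t i => 0 ≤ i ∧ i < (t.length : Int)) tb idxs) :
    mkRow cond idxs = selRow tb idxs := by
  unfold mkRow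
  have := mkRow_aux idxs hlink 0 [] (by simpa using hval)
  simpa using this


-- ---------- stepIdx computes stepSpec ----------
theorem stepFold_false (counts : List Int) (rng : List Nat) :
    ∀ (lst : List Int),
    (rng.foldl (fun (st : List Int × Bool) (j : Nat) =>
        let v := PySem.List.pyGetD st.1 (j : Int) 0
        if v > 0 ∧ st.2 then (PySem.List.pySetD st.1 (j : Int) (v - 1), false)
        else if v = 0 ∧ st.2 then (PySem.List.pySetD st.1 (j : Int) (PySem.List.pyGetD counts (j : Int) 0), st.2)
        else st) (lst, false)) = (lst, false) := by
  induction rng with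
  | nil => intro lst; rfl
  | cons j r ih =>
    intro lst
    simp only [List.foldl_cons, Bool.false_eq_true, and_false, if_false]
    exact ih lst

theorem stepIdx_aux (counts : List Int) :
    ∀ (is pre : List Int), (∀ x ∈ is, 0 ≤ x) → pre.length + is.length ≤ counts.length →
    ((List.range' pre.length is.length).foldl (fun (st : List Int × Bool) (j : Nat) =>
        let v := PySem.List.pyGetD st.1 (j : Int) 0
        if v > 0 ∧ st.2 then (PySem.List.pySetD st.1 (j : Int) (v - 1), false)
        else if v = 0 ∧ st.2 then (PySem.List.pySetD st.1 (j : Int) (PySem.List.pyGetD counts (j : Int) 0), st.2)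
        else st) (pre ++ is, true)).1
      = pre ++ stepSpec (counts.drop pre.length) is := by
  intro is
  induction is with
  | nil =>
    intro pre _ _
    rcases hcs : counts.drop pre.length with _ | ⟨c0, cs'⟩ <;> simp [stepSpec]
  | cons i is' ih =>
    intro pre hnn hlen
    obtain ⟨c0, cs', hcs⟩ : ∃ c0 cs', counts.drop pre.length = c0 :: cs' := by
      rcases h : counts.drop pre.length with _ | ⟨c0, cs'⟩
      · rw [List.drop_eq_nil_iff] at h
        simp only [List.length_cons] at hlen
        omega
      · exact ⟨_, _, rfl⟩
    have hcs1 : counts.drop (pre.length + 1) = cs' := by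
      have h2 := List.drop_drop (i := 1) (j := pre.length) (l := counts)
      rw [hcs] at h2
      simpa using h2.symm
    have hget0 : counts[pre.length]? = some c0 := by
      have : (counts.drop pre.length)[0]? = some c0 := by rw [hcs]; rfl
      rw [List.getElem?_drop] at this
      simpa using this
    have hgetc : PySem.List.pyGetD counts ((pre.length : Nat) : Int) 0 = c0 := by
      simp only [PySem.List.pyGetD_natCast]
      rw [List.getD_eq_getElem?_getD, hget0]
      rfl
    have hgetv : PySem.List.pyGetD (pre ++ i :: is') ((pre.length : Nat) : Int) 0 = i := by
      simp only [PySem.List.pyGetD_natCast]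
      rw [List.getD_eq_getElem?_getD, List.getElem?_append_right (le_refl _)]
      simp
    simp only [List.length_cons]
    rw [List.range'_succ]
    simp only [List.foldl_cons, hgetv, hgetc]
    by_cases hipos : 0 < i
    · rw [if_pos (⟨hipos, by trivial⟩ : _ ∧ _)]
      have hset : PySem.List.pySetD (pre ++ i :: is') ((pre.length : Nat) : Int) (i - 1)
          = pre ++ (i - 1) :: is' := by
        simp only [PySem.List.pySetD_natCast]
        rw [List.set_append, if_neg (lt_irrefl _)]
        simp
      rw [hset, stepFold_false]
      rw [hcs, stepSpec, if_pos hipos]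
    · have hieq : i = 0 := by have := hnn i (List.mem_cons_self); omega
      subst hieq
      rw [if_neg (by simp), if_pos (⟨by trivial, by trivial⟩ : _ ∧ _)]
      have hset : PySem.List.pySetD (pre ++ 0 :: is') ((pre.length : Nat) : Int) c0
          = pre ++ c0 :: is' := by
        simp only [PySem.List.pySetD_natCast]
        rw [List.set_append, if_neg (lt_irrefl _)]
        simp
      rw [hset, List.append_cons]
      have hlen1 : (pre ++ [c0]).length = pre.length + 1 := by simp
      have := ih (pre ++ [c0]) (fun x hx => hnn x (List.mem_cons_of_mem _ hx))
        (by simp only [hlen1, List.length_cons] at hlen ⊢; omega)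
      rw [hlen1] at this
      rw [this, hcs1, hcs, stepSpec, if_neg (lt_irrefl _)]
      simp


theorem stepIdx_eq (counts idxs : List Int) (hnn : ∀ x ∈ idxs, 0 ≤ x)
    (hlen : idxs.length ≤ counts.length) :
    stepIdx counts idxs = stepSpec counts idxs := by
  unfold stepIdx
  rw [List.range_eq_range']
  have h := stepIdx_aux counts idxs [] hnn (by simpa using hlen)
  simpa using h

-- ---------- the while-True loop computes Espec ----------
theorem mainLoop_acc (cond : List (String × PySem.Dict Int (List Int))) (counts : List Int) :
    ∀ (f : Nat) (idxs : List Int) (acc : List (List String)),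
      mainLoop cond counts f idxs acc = acc ++ mainLoop cond counts f idxs [] := by
  intro f
  induction f with
  | zero => intro idxs acc; simp [mainLoop]
  | succ f ih =>
    intro idxs acc
    rw [mainLoop, mainLoop]
    by_cases hz : allIsZero idxs
    · simp [hz]
    · simp only [hz, Bool.false_eq_true, if_false]
      rw [ih _ (acc ++ [mkRow cond idxs]), ih _ ([] ++ [mkRow cond idxs])]
      simp

theorem valid_bounds {tb : List (List String)} {idxs : List Int}
    (h : List.Forall₂ (fun c i => 0 ≤ i ∧ i ≤ c) (tb.map (fun t => (t.length : Int) - 1)) idxs) :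
    List.Forall₂ (fun (t : List String) i => 0 ≤ i ∧ i < (t.length : Int)) tb idxs := by
  rw [List.forall₂_map_left_iff] at h
  exact h.imp (fun ht => by omega)

theorem valid_nonneg : ∀ {cs is : List Int},
    List.Forall₂ (fun c i => 0 ≤ i ∧ i ≤ c) cs is → ∀ x ∈ is, 0 ≤ x := by
  intro cs is h
  induction h with
  | nil => simp
  | cons hp _ ih =>
    intro x hx
    rcases List.mem_cons.1 hx with rfl | hx
    · exact hp.1
    · exact ih x hx

theorem mainLoop_eq_Espec (cond : List (String × PySem.Dict Int (List Int)))
    (tb : List (List String)) (hlink : CondLink cond tb) :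
    ∀ (f : Nat) (idxs : List Int),
      List.Forall₂ (fun c i => 0 ≤ i ∧ i ≤ c) (tb.map (fun t => (t.length : Int) - 1)) idxs →
      mainLoop cond (tb.map (fun t => (t.length : Int) - 1)) f idxs []
        = Espec tb (tb.map (fun t => (t.length : Int) - 1)) f idxs := by
  intro f
  induction f with
  | zero => intro idxs _; rfl
  | succ f ih =>
    intro idxs hval
    rw [mainLoop, Espec]
    rw [mkRow_eq_selRow cond tb idxs hlink (valid_bounds hval)]
    by_cases hz : allIsZero idxs
    · simp [hz]
    · simp only [hz, Bool.false_eq_true, if_false]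
      rw [mainLoop_acc]
      rw [stepIdx_eq _ _ (valid_nonneg hval) (by
          have := hval.length_eq
          omega)]
      rw [ih _ (stepSpec_valid hval)]
      simp


-- ---------- descending index selections ----------
theorem descSel_eq_reverse_take : ∀ (t : List String) (k : Nat), k < t.length →
    descSel t k = (t.take (k+1)).reverse := by
  intro t k
  induction k with
  | zero =>
    intro hk
    cases t with
    | nil => simp at hk
    | cons a l => simp [descSel, PySem.List.pyGetD_zero_cons, List.take_succ]
  | succ k ih =>
    intro hk
    rw [descSel, ih (by omega)]
    have hcast : ((k : Int) + 1) = ((k + 1 : Nat) : Int) := by push_cast; ring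
    rw [hcast]
    simp only [PySem.List.pyGetD_natCast]
    rw [List.getD_eq_getElem _ _ hk]
    have h2 : List.take (k+1+1) t = List.take (k+1) t ++ [t[k+1]] := by
      rw [List.take_add_one, List.getElem?_eq_getElem hk]
      rfl
    rw [h2, List.reverse_append]
    rfl

theorem descSel_last (t : List String) (ht : t ≠ []) :
    descSel t (t.length - 1) = t.reverse := by
  have hl : 0 < t.length := List.length_pos_of_ne_nil ht
  rw [descSel_eq_reverse_take _ _ (by omega)]
  have h : t.length - 1 + 1 = t.length := by omega
  rw [h, List.take_length]

theorem descSel_pos (t : List String) (i : Int) (hi : 0 < i) :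
    descSel t i.toNat = PySem.List.pyGetD t i "" :: descSel t (i - 1).toNat := by
  have hk : i.toNat = (i - 1).toNat + 1 := by omega
  rw [hk, descSel]
  have hc : (((i - 1).toNat : Int) + 1) = i := by omega
  rw [hc]

theorem descSel_head (t : List String) (k : Nat) :
    ∃ tl, descSel t k = PySem.List.pyGetD t (k : Int) "" :: tl := by
  cases k with
  | zero => exact ⟨[], by simp [descSel]⟩
  | succ k =>
    refine ⟨descSel t k, ?_⟩
    rw [descSel]
    have hc : ((k : Int) + 1) = ((k + 1 : Nat) : Int) := by push_cast; ring
    rw [hc]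

-- ---------- the odometer enumerates the cartesian product ----------
theorem Espec_cons (t : List String) (tb : List (List String)) (c0 : Int) (cs : List Int) :
    ∀ (f1 : Nat) (i : Int) (is : List Int) (f2 : Nat),
      List.Forall₂ (fun c i => 0 ≤ i ∧ i ≤ c) cs is → 0 ≤ i → i ≤ c0 →
      (Vval (i :: is) (c0 :: cs)).toNat + 1 ≤ f1 → (Vval is cs).toNat + 1 ≤ f2 →
      Espec (t :: tb) (c0 :: cs) f1 (i :: is)
        = (descSel t i.toNat).map (· :: selRow tb is)
          ++ (Espec tb cs f2 is).tail.flatMap (fun r => (descSel t c0.toNat).map (· :: r)) := by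
  intro f1
  induction f1 with
  | zero => intro i is f2 _ _ _ hf1 _; omega
  | succ f1 ih =>
    intro i is f2 hval hi0 hic hf1 hf2
    obtain ⟨f2', rfl⟩ : ∃ f2', f2 = f2' + 1 := ⟨f2 - 1, by omega⟩
    have hvalc : List.Forall₂ (fun c i => 0 ≤ i ∧ i ≤ c) (c0 :: cs) (i :: is) :=
      List.Forall₂.cons ⟨hi0, hic⟩ hval
    have hsel : selRow (t :: tb) (i :: is) = PySem.List.pyGetD t i "" :: selRow tb is := by
      simp [selRow]
    rw [Espec]
    by_cases hz : allIsZero (i :: is)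
    · have hi : i = 0 := by
        rw [allIsZero_cons] at hz; simp at hz; exact hz.1
      have hzis : allIsZero is = true := by
        rw [allIsZero_cons] at hz; simp at hz; exact hz.2
      subst hi
      rw [Espec]
      simp [hz, hzis, hsel, descSel]
    · simp only [hz, Bool.false_eq_true, if_false]
      have hzb : allIsZero (i :: is) = false := by
        cases h : allIsZero (i :: is)
        · rfl
        · exact absurd h hz
      by_cases hip : 0 < i
      · have hstep : stepSpec (c0 :: cs) (i :: is) = (i - 1) :: is := by
          rw [stepSpec, if_pos hip]
        have hVdec : Vval ((i - 1) :: is) (c0 :: cs) = Vval (i :: is) (c0 :: cs) - 1 := by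
          have := stepSpec_V hvalc hzb
          rwa [hstep] at this
        have hVnn : 0 ≤ Vval ((i - 1) :: is) (c0 :: cs) :=
          Vval_nonneg (List.Forall₂.cons ⟨by omega, by omega⟩ hval)
        rw [hstep, ih (i - 1) is (f2' + 1) hval (by omega) (by omega) (by omega) hf2]
        rw [descSel_pos t i hip, hsel]
        simp
      · have hi : i = 0 := by omega
        subst hi
        have hznis : allIsZero is = false := by
          rw [allIsZero_cons] at hzb; simpa using hzb
        have hstep : stepSpec (c0 :: cs) (0 :: is) = c0 :: stepSpec cs is := by
          rw [stepSpec, if_neg (lt_irrefl _)]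
        have hVis0 : 0 ≤ Vval is cs := Vval_nonneg hval
        have hVisne : ¬ (Vval is cs = 0) := fun h => by
          have h2 := (Vval_zero_iff hval).2 h
          rw [h2] at hznis
          simp at hznis
        have hVis1 : 1 ≤ Vval is cs := by omega
        have hVdec : Vval (stepSpec cs is) cs = Vval is cs - 1 := stepSpec_V hval hznis
        have hvstep := stepSpec_valid hval
        have hVcons : Vval (c0 :: stepSpec cs is) (c0 :: cs) = Vval (0 :: is) (c0 :: cs) - 1 := by
          simp only [Vval, hVdec]; ring
        have hV0nn : 0 ≤ Vval (0 :: is) (c0 :: cs) := Vval_nonneg hvalc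
        have hVstepnn : 0 ≤ Vval (stepSpec cs is) cs := Vval_nonneg hvstep
        have hVcne : ¬ (Vval (0 :: is) (c0 :: cs) = 0) := fun h => by
          have h2 := (Vval_zero_iff hvalc).2 h
          rw [h2] at hzb
          simp at hzb
        have hfa : (Vval (c0 :: stepSpec cs is) (c0 :: cs)).toNat + 1 ≤ f1 := by
          rw [hVcons]; omega
        have hfb : (Vval (stepSpec cs is) cs).toNat + 1 ≤ f2' := by
          rw [hVdec]; omega
        rw [hstep, ih c0 (stepSpec cs is) f2' hvstep (by omega) (le_refl c0) hfa hfb]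
        obtain ⟨f2'', rfl⟩ : ∃ f2'', f2' = f2'' + 1 := ⟨f2' - 1, by omega⟩
        have hE1 : Espec tb cs (f2'' + 1 + 1) is
            = selRow tb is :: Espec tb cs (f2'' + 1) (stepSpec cs is) := by
          rw [Espec]; simp [hznis]
        obtain ⟨rest, hrest⟩ : ∃ rest, Espec tb cs (f2'' + 1) (stepSpec cs is)
            = selRow tb (stepSpec cs is) :: rest := by
          rw [Espec]; exact ⟨_, rfl⟩
        rw [hE1, hrest]
        simp [hsel, descSel]


theorem combSpec_cons (t : List String) (tb : List (List String)) :
    combSpec (t :: tb) = (combSpec tb).flatMap (fun c => t.reverse.map (fun s => s :: c)) := rfl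

theorem combSpec_head : ∀ (tb : List (List String)), (∀ t ∈ tb, t ≠ []) →
    ∃ rest, combSpec tb = selRow tb (tb.map (fun t => (t.length : Int) - 1)) :: rest := by
  intro tb
  induction tb with
  | nil => intro _; exact ⟨[], rfl⟩
  | cons t tb ih =>
    intro hne
    obtain ⟨rest, hr⟩ := ih (fun x hx => hne x (List.mem_cons_of_mem _ hx))
    have ht : t ≠ [] := hne t List.mem_cons_self
    have hlen : 0 < t.length := List.length_pos_of_ne_nil ht
    obtain ⟨tl, htl⟩ := descSel_head t (t.length - 1)
    have hc : ((t.length - 1 : Nat) : Int) = (t.length : Int) - 1 := by omega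
    rw [hc] at htl
    have hrev : t.reverse = PySem.List.pyGetD t ((t.length : Int) - 1) "" :: tl := by
      rw [← descSel_last t ht]
      exact htl
    refine ⟨tl.map (· :: selRow tb (tb.map (fun t => (t.length : Int) - 1)))
      ++ rest.flatMap (fun c => t.reverse.map (fun s => s :: c)), ?_⟩
    rw [combSpec_cons, hr, List.flatMap_cons]
    have hhead : t.reverse.map (fun s => s :: selRow tb (tb.map (fun t => (t.length : Int) - 1)))
        = (PySem.List.pyGetD t ((t.length : Int) - 1) "" :: selRow tb (tb.map (fun t => (t.length : Int) - 1)))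
          :: tl.map (fun s => s :: selRow tb (tb.map (fun t => (t.length : Int) - 1))) := by
      rw [hrev, List.map_cons]
    rw [hhead]
    simp only [selRow, List.map_cons, List.zip_cons_cons]
    rfl

theorem valid_refl : ∀ (tb : List (List String)), (∀ t ∈ tb, t ≠ []) →
    List.Forall₂ (fun c i => 0 ≤ i ∧ i ≤ c)
      (tb.map (fun t => (t.length : Int) - 1)) (tb.map (fun t => (t.length : Int) - 1)) := by
  intro tb
  induction tb with
  | nil => intro _; exact List.Forall₂.nil
  | cons t tb ih =>
    intro hne
    have hlen : 0 < t.length := List.length_pos_of_ne_nil (hne t List.mem_cons_self)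
    refine List.Forall₂.cons ⟨?_, le_refl _⟩ (ih (fun x hx => hne x (List.mem_cons_of_mem _ hx)))
    show (0 : Int) ≤ (t.length : Int) - 1
    omega

theorem Espec_full : ∀ (tb : List (List String)), (∀ t ∈ tb, t ≠ []) →
    ∀ (f : Nat),
      (Vval (tb.map (fun t => (t.length : Int) - 1)) (tb.map (fun t => (t.length : Int) - 1))).toNat + 1 ≤ f →
      Espec tb (tb.map (fun t => (t.length : Int) - 1)) f (tb.map (fun t => (t.length : Int) - 1))
        = combSpec tb := by
  intro tb
  induction tb with
  | nil =>
    intro _ f hf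
    obtain ⟨f', rfl⟩ : ∃ f', f = f' + 1 := ⟨f - 1, by omega⟩
    rw [Espec]
    rfl
  | cons t tb ih =>
    intro hne f hf
    have ht : t ≠ [] := hne t List.mem_cons_self
    have hlen : 0 < t.length := List.length_pos_of_ne_nil ht
    have hnetb : ∀ x ∈ tb, x ≠ [] := fun x hx => hne x (List.mem_cons_of_mem _ hx)
    have hval := valid_refl tb hnetb
    simp only [List.map_cons] at hf ⊢
    rw [Espec_cons t tb ((t.length : Int) - 1) (tb.map (fun t => (t.length : Int) - 1)) f
      ((t.length : Int) - 1) (tb.map (fun t => (t.length : Int) - 1))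
      ((Vval (tb.map (fun t => (t.length : Int) - 1)) (tb.map (fun t => (t.length : Int) - 1))).toNat + 1)
      hval (by omega) (le_refl _) hf (le_refl _)]
    rw [ih hnetb _ (le_refl _)]
    obtain ⟨rest, hr⟩ := combSpec_head tb hnetb
    rw [hr]
    have htn : ((t.length : Int) - 1).toNat = t.length - 1 := by omega
    rw [htn, descSel_last t ht, combSpec_cons, hr, List.flatMap_cons]
    rfl

theorem foldl_mul (c : List Int) : ∀ a : Int,
    c.foldl (fun a c => a * (c + 1)) a = a * c.foldl (fun a c => a * (c + 1)) 1 := by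
  induction c with
  | nil => intro a; simp
  | cons c0 cs ih =>
    intro a
    simp only [List.foldl_cons]
    rw [ih (a * (c0 + 1)), ih (1 * (c0 + 1))]
    ring

theorem Vval_self_prod : ∀ (c : List Int), (∀ x ∈ c, 0 ≤ x) →
    Vval c c + 1 = c.foldl (fun a c => a * (c + 1)) 1 := by
  intro c
  induction c with
  | nil => intro _; rfl
  | cons c0 cs ih =>
    intro h
    simp only [List.foldl_cons, Vval]
    rw [foldl_mul cs (1 * (c0 + 1))]
    rw [← ih (fun x hx => h x (List.mem_cons_of_mem _ hx))]
    ring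

theorem forall₂_map_map {α β γ : Type} (l : List α) (f : α → β) (g : α → γ)
    (R : β → γ → Prop) (h : ∀ x ∈ l, R (f x) (g x)) :
    List.Forall₂ R (l.map f) (l.map g) := by
  induction l with
  | nil => exact List.Forall₂.nil
  | cons x xs ih =>
    exact List.Forall₂.cons (h x List.mem_cons_self)
      (ih (fun y hy => h y (List.mem_cons_of_mem _ hy)))

theorem chunksOf_ne_nil (vals : List Int) (factor : Int) (hp : 0 < factor) :
    chunksOf vals factor ≠ [] := by
  unfold chunksOf
  by_cases hlt : (vals.length : Int) < factor
  · simp [hlt]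
  · rw [if_neg hlt]
    have hvne : vals ≠ [] := by
      intro h
      subst h
      simp at hlt
      omega
    have hg : 0 < -(PySem.Int.floordiv (-(vals.length : Int)) factor) :=
      ceil_pos _ _ hp (by simp at hlt ⊢; omega)
    rw [chunkLoop_eq_chunksWF _ hg _ _ (le_refl _)]
    exact chunksWF_ne_nil _ _ hg hvne


theorem build_eq (factor : Int) : ∀ (items : List (String × List Int))
    (a : List (String × PySem.Dict Int (List Int))) (b c : List Int),
    items.foldl (fun (st : List (String × PySem.Dict Int (List Int)) × List Int × List Int) kv =>
      let d := splitPy kv.2 factor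
      (st.1 ++ [(kv.1, d)], st.2.1 ++ [(d.size : Int) - 1], st.2.2 ++ [(d.size : Int) - 1])) (a, b, c)
    = (a ++ items.map (fun kv => (kv.1, splitPy kv.2 factor)),
       b ++ items.map (fun kv => ((splitPy kv.2 factor).size : Int) - 1),
       c ++ items.map (fun kv => ((splitPy kv.2 factor).size : Int) - 1)) := by
  intro items
  induction items with
  | nil => intro a b c; simp
  | cons kv rest ih =>
    intro a b c
    simp only [List.foldl_cons, List.map_cons]
    rw [ih]
    simp

theorem incisecore_eq_alt (dictionary : List (String × List Int)) (factor : Int)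
    (hpre : dictionary = [] ∨ 1 ≤ factor) :
    incisecore dictionary factor = incisecore_alt dictionary factor := by
  by_cases hf : 1 ≤ factor
  · have hp : 0 < factor := hf
    simp only [incisecore, incisecore_alt]
    rw [build_eq factor _ [] [] []]
    simp only [List.nil_append]
    set items := (PySem.Dict.ofList dictionary).items with hitems
    set tb := items.map (fun kv => (chunksOf kv.2 factor).map (fun c => condStr kv.1 c)) with htb
    have hcounts : items.map (fun kv => ((splitPy kv.2 factor).size : Int) - 1)
        = tb.map (fun t => (t.length : Int) - 1) := by
      rw [htb, List.map_map]
      apply List.map_congr_left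
      intro kv _
      simp only [Function.comp]
      rw [splitPy_size _ _ hp, List.length_map]
    have hne : ∀ t ∈ tb, t ≠ [] := by
      rw [htb]
      intro t ht
      rw [List.mem_map] at ht
      obtain ⟨kv, _, rfl⟩ := ht
      simp only [ne_eq, List.map_eq_nil_iff]
      exact chunksOf_ne_nil _ _ hp
    have hlink : CondLink (items.map (fun kv => (kv.1, splitPy kv.2 factor))) tb := by
      rw [htb]
      apply forall₂_map_map
      intro kv _ i hi0 hilt
      rw [List.length_map] at hilt
      have hi' : i = ((i.toNat : Nat) : Int) := by omega
      have hlt : i.toNat < (chunksOf kv.2 factor).length := by omega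
      rw [splitPy_getD _ _ hp i hi0 (by exact_mod_cast hilt)]
      rw [hi', PySem.List.pyGetD_natCast]
      simp only [Int.toNat_natCast]
      rw [List.getD_eq_getElem _ _ hlt, List.getD_eq_getElem _ _ (by simpa using hlt),
        List.getElem_map]
    have hvalid := valid_refl tb hne
    have hnnc : ∀ x ∈ tb.map (fun t => (t.length : Int) - 1), 0 ≤ x := by
      intro x hx
      rw [List.mem_map] at hx
      obtain ⟨t, ht, rfl⟩ := hx
      have := List.length_pos_of_ne_nil (hne t ht)
      omega
    have hVnn := Vval_nonneg hvalid
    have hprod := Vval_self_prod (tb.map (fun t => (t.length : Int) - 1)) hnnc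
    rw [hcounts]
    rw [mainLoop_eq_Espec _ tb hlink _ _ hvalid]
    rw [Espec_full tb hne _ (by rw [← hprod]; omega)]
    rw [List.foldl_reverse]
    rfl
  · have hd : dictionary = [] := by
      rcases hpre with hd | hfc
      · exact hd
      · exact absurd hfc hf
    subst hd
    rfl

-- ===== VERDICT (by name: the statement is the Claim_ definition above) =====
theorem incisecore_spec : Claim_equal_incisecore := by
  intro dictionary factor _ hpre
  unfold Pre_incisecore at hpre
  unfold Spec_incisecore
  exact incisecore_eq_alt dictionary factor hpre
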